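-- pv_equiv track=rewrite | github.com/dongkyunk/Kaggle_RPS | model/geometry.py | _find_all_longest
-- ===== SOURCE A (Python) =====
-- import operator
-- from typing import List
-- from collections import namedtuple
--
-- HistMatchResult = namedtuple("HistMatchResult", "idx length")
--
-- def _find_all_longest(seq, max_len=None) -> List[HistMatchResult]:
--     """
--     Find all indices where end of `seq` matches some past.
--     """
--     result = []
--
--     i_search_start = len(seq) - 2
--
--     while i_search_start > 0:
--         i_sub = -1
--         i_search = i_search_start
--         length = 0
--
--         while i_search >= 0 and seq[i_sub] == seq[i_search]:
--             length += 1
--             i_sub -= 1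
--             i_search -= 1
--
--             if max_len is not None and length > max_len:
--                 break
--
--         if length > 0:
--             result.append(HistMatchResult(i_search_start + 1, length))
--
--         i_search_start -= 1
--
--     result = sorted(result, key=operator.attrgetter(
--         "length"), reverse=True)
--
--     return result
-- ===== SOURCE B (Python) =====
-- from typing import List
-- from collections import namedtuple
--
-- HistMatchResult = namedtuple("HistMatchResult", "idx length")
--
-- def _find_all_longest(seq, max_len=None) -> List[HistMatchResult]:
--     """
--     Z-function on the reversed sequence: z[j] = longest common prefix of
--     rev and rev[j:], computed in O(n); entry at past index i = n-1-j has
--     match length z[j], capped the way the original caps (at max_len + 1).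
--     """
--     n = len(seq)
--     rev = seq[::-1]
--     z = [0] * n
--     l = r = 0
--     for j in range(1, n):
--         k = 0
--         if j < r:
--             k = min(r - j, z[j - l])
--         while j + k < n and rev[k] == rev[j + k]:
--             k += 1
--         z[j] = k
--         if j + k > r:
--             l, r = j, j + k
--     result = [HistMatchResult(n - j, z[j] if max_len is None else min(z[j], max(1, max_len + 1)))
--               for j in range(1, n - 1) if z[j] > 0]
--     return sorted(result, key=lambda r: r.length, reverse=True)
-- ===== Notes on version B (the rewrite author's own statement) =====
-- stated objective: faster
-- what changed: Replaces the per-position backward rescan (quadratic on repetitive input) with a single Z-function pass over the reversed sequence (z-box reuse), then emits the same capped entries in the same order and applies the same stable sort.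
import Mathlib
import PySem

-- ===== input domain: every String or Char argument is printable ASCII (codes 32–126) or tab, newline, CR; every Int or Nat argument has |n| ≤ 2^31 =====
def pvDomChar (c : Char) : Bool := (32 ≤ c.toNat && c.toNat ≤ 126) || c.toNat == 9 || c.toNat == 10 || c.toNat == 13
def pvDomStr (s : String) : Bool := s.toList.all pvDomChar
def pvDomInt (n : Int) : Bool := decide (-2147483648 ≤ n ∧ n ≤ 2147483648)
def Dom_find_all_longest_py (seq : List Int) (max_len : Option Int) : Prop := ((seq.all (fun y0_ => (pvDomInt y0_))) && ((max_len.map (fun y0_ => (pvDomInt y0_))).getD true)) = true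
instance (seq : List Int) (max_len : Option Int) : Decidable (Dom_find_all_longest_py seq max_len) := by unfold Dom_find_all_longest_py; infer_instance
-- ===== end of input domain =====

-- B replaces A's per-position backward rescan by a single Z-function pass over the
-- reversed sequence (z-box reuse) producing the same capped entries and the same stable sort.


-- ===== PORT A =====
-- inner while loop of A; fuel = i_search.toNat + 1 is a pure totality guard (the loop
-- decrements i_search each round and stops before it passes -1, so fuel never runs out)
def pvAInner (seq : List Int) (max_len : Option Int) : Nat → Int → Int → Int → Int
  | 0, _, _, length => length
  | fuel+1, i_sub, i_search, length =>
    if 0 ≤ i_search ∧ PySem.List.pyGet? seq i_sub = PySem.List.pyGet? seq i_search then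
      -- length += 1; i_sub -= 1; i_search -= 1; if max_len is not None and length > max_len: break
      match max_len with
      | some m => if length + 1 > m then length + 1
                  else pvAInner seq max_len fuel (i_sub - 1) (i_search - 1) (length + 1)
      | none => pvAInner seq max_len fuel (i_sub - 1) (i_search - 1) (length + 1)
    else length

-- outer while loop of A, appending HistMatchResult(i_search_start + 1, length) pairs
def pvAOuter (seq : List Int) (max_len : Option Int) (i_search_start : Int)
    (result : List (Int × Int)) : List (Int × Int) :=
  if _h : 0 < i_search_start then
    let length := pvAInner seq max_len (i_search_start.toNat + 1) (-1) i_search_start 0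
    pvAOuter seq max_len (i_search_start - 1)
      (if 0 < length then result ++ [(i_search_start + 1, length)] else result)
  else result
termination_by i_search_start.toNat
decreasing_by omega

def find_all_longest_py (seq : List Int) (max_len : Option Int) : List (Int × Int) :=
  PySem.List.sorted (pvAOuter seq max_len ((seq.length : Int) - 2) []) (fun p => p.2) true

-- ===== PORT B =====
-- `while j + k < n and rev[k] == rev[j + k]: k += 1`
def pvZExtend (rev : List Int) (j k : Int) : Int :=
  if _h : j + k < rev.length ∧ PySem.List.pyGet? rev k = PySem.List.pyGet? rev (j + k) then
    pvZExtend rev j (k + 1)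
  else k
termination_by ((rev.length : Int) - (j + k)).toNat
decreasing_by omega

-- one iteration of B's `for j in range(1, n)` loop; state = (z, l, r);
-- `z[j - l]` and `z[j] = k` are plain in-range indexing (0 ≤ j - l < n, 0 ≤ j < n), exact here
def pvZStep (rev : List Int) (st : List Int × Int × Int) (j : Int) : List Int × Int × Int :=
  let k0 : Int := if j < st.2.2 then min (st.2.2 - j) (PySem.List.pyGetD st.1 (j - st.2.1) 0) else 0
  let k := pvZExtend rev j k0
  let z' := st.1.set j.toNat k
  if st.2.2 < j + k then (z', j, j + k) else (z', st.2.1, st.2.2)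

def find_all_longest_py_alt (seq : List Int) (max_len : Option Int) : List (Int × Int) :=
  let n : Int := seq.length
  let rev := seq.reverse   -- seq[::-1] is exactly list reversal
  let st := (PySem.List.pyRange 1 n 1).foldl (pvZStep rev) (List.replicate seq.length 0, 0, 0)
  -- [HistMatchResult(n - j, z[j] if max_len is None else min(z[j], max(1, max_len + 1)))
  --  for j in range(1, n - 1) if z[j] > 0]
  let result := ((PySem.List.pyRange 1 (n - 1) 1).filter
      (fun j => 0 < PySem.List.pyGetD st.1 j 0)).map
      (fun j => (n - j, match max_len with
                        | none => PySem.List.pyGetD st.1 j 0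
                        | some m => min (PySem.List.pyGetD st.1 j 0) (max 1 (m + 1))))
  PySem.List.sorted result (fun p => p.2) true

-- ===== PRECONDITION & SPEC =====
def Spec_find_all_longest_py (seq : List Int) (max_len : Option Int) (out : List (Int × Int)) : Prop := out = find_all_longest_py_alt seq max_len
instance (seq : List Int) (max_len : Option Int) (out : List (Int × Int)) : Decidable (Spec_find_all_longest_py seq max_len out) := by unfold Spec_find_all_longest_py; infer_instance

-- ===== CLAIM (what is proved, stated in full; the proofs are below) =====
def Claim_equal_find_all_longest_py : Prop := ∀ (seq : List Int) (max_len : Option Int), Dom_find_all_longest_py seq max_len → Spec_find_all_longest_py seq max_len (find_all_longest_py seq max_len)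

-- ===== LEMMAS AND PROOFS =====

-- longest common prefix of two lists: the common reference value both loops compute
def pvLcp : List Int → List Int → Nat
  | a :: as, b :: bs => if a = b then pvLcp as bs + 1 else 0
  | _, _ => 0

theorem pvLcp_le_left : ∀ (xs ys : List Int), pvLcp xs ys ≤ xs.length := by
  intro xs
  induction xs with
  | nil => intro ys; cases ys <;> simp [pvLcp]
  | cons a as ih =>
    intro ys; cases ys with
    | nil => simp [pvLcp]
    | cons b bs =>
      simp only [pvLcp]
      split
      · simpa using ih bs
      · simp

theorem pvLcp_le_right : ∀ (xs ys : List Int), pvLcp xs ys ≤ ys.length := by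
  intro xs
  induction xs with
  | nil => intro ys; cases ys <;> simp [pvLcp]
  | cons a as ih =>
    intro ys; cases ys with
    | nil => simp [pvLcp]
    | cons b bs =>
      simp only [pvLcp]
      split
      · simpa using ih bs
      · simp

theorem pvLcp_take : ∀ (xs ys : List Int),
    xs.take (pvLcp xs ys) = ys.take (pvLcp xs ys) := by
  intro xs
  induction xs with
  | nil => intro ys; cases ys <;> simp [pvLcp]
  | cons a as ih =>
    intro ys; cases ys with
    | nil => simp [pvLcp]
    | cons b bs =>
      simp only [pvLcp]
      split
      · next hab => simp [List.take_succ_cons, hab, ih bs]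
      · simp

theorem pvLcp_get?_ne : ∀ (xs ys : List Int), pvLcp xs ys < xs.length → pvLcp xs ys < ys.length →
    xs[pvLcp xs ys]? ≠ ys[pvLcp xs ys]? := by
  intro xs
  induction xs with
  | nil => intro ys h1 h2; simp at h1
  | cons a as ih =>
    intro ys h1 h2
    cases ys with
    | nil => simp at h2
    | cons b bs =>
      by_cases hab : a = b
      · have hl : pvLcp (a :: as) (b :: bs) = pvLcp as bs + 1 := by simp [pvLcp, hab]
        rw [hl] at h1 h2 ⊢
        simpa using ih bs (by simpa using h1) (by simpa using h2)
      · have hl : pvLcp (a :: as) (b :: bs) = 0 := by simp [pvLcp, hab]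
        rw [hl]
        simpa using hab

theorem pvLcp_eq_of : ∀ (k : Nat) (xs ys : List Int), k ≤ xs.length → k ≤ ys.length →
    xs.take k = ys.take k → xs[k]? ≠ ys[k]? → pvLcp xs ys = k := by
  intro k
  induction k with
  | zero =>
    intro xs ys _ _ _ hne
    cases xs with
    | nil => cases ys with
      | nil => simp at hne
      | cons b bs => simp [pvLcp]
    | cons a as =>
      cases ys with
      | nil => simp [pvLcp]
      | cons b bs =>
        have : a ≠ b := by simpa using hne
        simp [pvLcp, this]
  | succ k ih =>
    intro xs ys hx hy ht hne
    cases xs with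
    | nil => simp at hx
    | cons a as =>
      cases ys with
      | nil => simp at hy
      | cons b bs =>
        simp only [List.take_succ_cons, List.cons.injEq] at ht
        have : pvLcp as bs = k := ih as bs (by simpa using hx) (by simpa using hy) ht.2
          (by simpa using hne)
        simp [pvLcp, ht.1, this]

theorem pvLe_lcp_of_take : ∀ (k : Nat) (xs ys : List Int), k ≤ xs.length → k ≤ ys.length →
    xs.take k = ys.take k → k ≤ pvLcp xs ys := by
  intro k
  induction k with
  | zero => intro xs ys _ _ _; omega
  | succ k ih =>
    intro xs ys hx hy ht
    cases xs with
    | nil => simp at hx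
    | cons a as =>
      cases ys with
      | nil => simp at hy
      | cons b bs =>
        simp only [List.take_succ_cons, List.cons.injEq] at ht
        have := ih as bs (by simpa using hx) (by simpa using hy) ht.2
        simp [pvLcp, ht.1]
        omega


theorem pvTake_trunc {xs ys : List Int} {m k : Nat} (h1 : m ≤ k) (h2 : xs.take k = ys.take k) :
    xs.take m = ys.take m := by
  have := congrArg (List.take m) h2
  simpa [List.take_take, Nat.min_eq_left h1] using this

theorem pvTakeEq_get? {xs ys : List Int} {m t : Nat} (h : xs.take m = ys.take m) (ht : t < m) :
    xs[t]? = ys[t]? := by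
  have := congrArg (fun l => l[t]?) h
  simpa [List.getElem?_take, ht] using this

-- match length at shift j of the reversed sequence
def pvL (rev : List Int) (j : Nat) : Nat := pvLcp rev (rev.drop j)

-- the (capped) length A records for a given raw match length L
def pvT (max_len : Option Int) (L : Nat) : Nat :=
  match max_len with
  | none => L
  | some m => min L (max 1 (m + 1)).toNat

theorem pvL_le (rev : List Int) (j : Nat) : pvL rev j ≤ rev.length - j := by
  have := pvLcp_le_right rev (rev.drop j)
  simpa [pvL] using this

theorem pvZExtend_spec (rev : List Int) (j k : Nat) (hj : 1 ≤ j) (hk : k ≤ pvL rev j) :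
    pvZExtend rev (j : Int) (k : Int) = (pvL rev j : Int) := by
  have hL := pvL_le rev j
  rw [pvZExtend]
  rcases Nat.lt_or_ge k (pvL rev j) with hlt | hge
  · have hrange : ((j : Int) + (k : Int) < rev.length) := by
      omega
    have hget : PySem.List.pyGet? rev (k : Int) = PySem.List.pyGet? rev ((j : Int) + (k : Int)) := by
      have hjk : ((j : Int) + (k : Int)) = ((j + k : Nat) : Int) := by push_cast; ring
      rw [hjk, PySem.List.pyGet?_natCast, PySem.List.pyGet?_natCast]
      have h1 : rev[k]? = (rev.drop j)[k]? := pvTakeEq_get? (pvLcp_take rev (rev.drop j)) hlt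
      rw [h1, List.getElem?_drop]
    rw [dif_pos ⟨hrange, hget⟩]
    have hcast : ((k : Int) + 1) = ((k + 1 : Nat) : Int) := by push_cast; ring
    rw [hcast]
    exact pvZExtend_spec rev j (k + 1) hj hlt
  · have hkL : k = pvL rev j := le_antisymm hk hge
    rw [dif_neg]
    · exact congrArg _ hkL
    · rintro ⟨h1, h2⟩
      have hjk : j + k < rev.length := by omega
      have hd : (rev.drop j).length = rev.length - j := by simp
      simp only [pvL] at hkL hL
      have hne := pvLcp_get?_ne rev (rev.drop j) (by omega : pvLcp rev (rev.drop j) < rev.length)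
        (by rw [hd]; omega)
      apply hne
      have hjk2 : ((j : Int) + (k : Int)) = ((j + k : Nat) : Int) := by push_cast; ring
      rw [hjk2, PySem.List.pyGet?_natCast, PySem.List.pyGet?_natCast] at h2
      rw [List.getElem?_drop, ← hkL]
      exact h2
termination_by pvL rev j - k

-- loop invariant of B's z loop
def pvInv (rev : List Int) (j : Nat) (st : List Int × Int × Int) : Prop :=
  st.1.length = rev.length ∧
  (∀ t : Nat, 1 ≤ t → t < j → st.1[t]? = some ((pvL rev t : Int))) ∧
  ∃ ln rn : Nat, st.2.1 = (ln : Int) ∧ st.2.2 = (rn : Int) ∧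
    ((ln = 0 ∧ rn = 0) ∨
     (1 ≤ ln ∧ ln < j ∧ ln ≤ rn ∧ rn ≤ rev.length ∧ rn - ln ≤ pvL rev ln))

theorem pvZStep_inv (rev : List Int) (j : Nat) (st : List Int × Int × Int)
    (hinv : pvInv rev j st) (hj1 : 1 ≤ j) (hjn : j < rev.length) :
    pvInv rev (j + 1) (pvZStep rev st (j : Int)) := by
  obtain ⟨z, l, r⟩ := st
  obtain ⟨hlen, hz, ln, rn, hl, hr, hbox⟩ := hinv
  simp only at hlen hz hl hr hbox
  subst hl hr
  -- the initial k of this round, as a natural number bounded by the true match length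
  have hk0 : ∃ k0n : Nat, k0n ≤ pvL rev j ∧
      ((if (j : Int) < (rn : Int) then
          min ((rn : Int) - (j : Int)) (PySem.List.pyGetD z ((j : Int) - (ln : Int)) 0)
        else 0) = (k0n : Int)) := by
    by_cases hjr : (j : Int) < (rn : Int)
    · have hjrn : j < rn := by exact_mod_cast hjr
      rcases hbox with ⟨h0, h0'⟩ | ⟨hln1, hlnj, hlnrn, hrnlen, hbox'⟩
      · omega
      · set jl := j - ln with hjl
        have hjl1 : 1 ≤ jl := by omega
        have hjlj : jl < j := by omega
        have hzjl : z[jl]? = some ((pvL rev jl : Int)) := hz jl hjl1 hjlj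
        have hgetd : PySem.List.pyGetD z ((j : Int) - (ln : Int)) 0 = ((pvL rev jl : Int)) := by
          have hcast : ((j : Int) - (ln : Int)) = ((jl : Nat) : Int) := by omega
          rw [hcast, PySem.List.pyGetD_natCast, List.getD_eq_getElem?_getD, hzjl]
          rfl
        -- the z-box gives: the window [j, rn) of rev repeats the window [jl, rn - ln) of rev
        have hstar : (rev.drop jl).take (rn - j) = (rev.drop j).take (rn - j) := by
          have hA : rev.take (rn - ln) = (rev.drop ln).take (rn - ln) :=
            pvTake_trunc (by simpa [pvL] using hbox') (pvLcp_take rev (rev.drop ln))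
          have hB := congrArg (List.drop jl) hA
          rw [List.drop_take, List.drop_take, List.drop_drop] at hB
          have e1 : rn - ln - jl = rn - j := by omega
          have e2 : ln + jl = j := by omega
          rw [e1, e2] at hB
          exact hB
        rcases Nat.lt_or_ge (pvL rev jl) (rn - j) with hB1 | hB2
        · -- z[j - l] < r - j : this round's match length is exactly z[j - l]
          refine ⟨pvL rev jl, ?_, ?_⟩
          · have heq : pvL rev j = pvL rev jl := by
              have hle1 : pvL rev jl ≤ rev.length := pvLcp_le_left rev (rev.drop jl)
              have hle2 : pvL rev jl ≤ (rev.drop j).length := by simp; omega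
              have ht : rev.take (pvL rev jl) = (rev.drop j).take (pvL rev jl) := by
                have t1 : rev.take (pvL rev jl) = (rev.drop jl).take (pvL rev jl) :=
                  pvLcp_take rev (rev.drop jl)
                have t2 : (rev.drop jl).take (pvL rev jl) = (rev.drop j).take (pvL rev jl) :=
                  pvTake_trunc (by omega) hstar
                rw [t1, t2]
              have hne : rev[pvL rev jl]? ≠ (rev.drop j)[pvL rev jl]? := by
                have hd1 : (rev.drop j)[pvL rev jl]? = (rev.drop jl)[pvL rev jl]? :=
                  (pvTakeEq_get? hstar hB1).symm
                rw [hd1]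
                have hr1 : pvL rev jl < rev.length := by omega
                have hr2 : pvL rev jl < (rev.drop jl).length := by simp; omega
                exact pvLcp_get?_ne rev (rev.drop jl) hr1 hr2
              exact pvLcp_eq_of (pvL rev jl) rev (rev.drop j) hle1 hle2 ht hne
            omega
          · rw [hgetd, if_pos hjr]
            omega
        · -- r - j ≤ z[j - l] : at least r - j matches are guaranteed
          refine ⟨rn - j, ?_, ?_⟩
          · apply pvLe_lcp_of_take (rn - j) rev (rev.drop j) (by omega) (by simp; omega)
            have t1 : rev.take (rn - j) = (rev.drop jl).take (rn - j) :=
              pvTake_trunc hB2 (pvLcp_take rev (rev.drop jl))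
            rw [t1, hstar]
          · rw [hgetd, if_pos hjr]
            omega
    · exact ⟨0, Nat.zero_le _, by rw [if_neg hjr]; simp⟩
  obtain ⟨k0n, hk0le, hk0eq⟩ := hk0
  have hLle := pvL_le rev j
  simp only [pvZStep]
  rw [hk0eq, pvZExtend_spec rev j k0n hj1 hk0le]
  have htoNat : ((j : Int)).toNat = j := Int.toNat_natCast j
  rw [htoNat]
  have hset_len : (z.set j (pvL rev j : Int)).length = rev.length := by simp [hlen]
  have hset_get : ∀ t : Nat, 1 ≤ t → t < j + 1 →
      (z.set j (pvL rev j : Int))[t]? = some ((pvL rev t : Int)) := by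
    intro t ht1 htj
    rcases Nat.lt_or_ge t j with hlt | hge
    · rw [List.getElem?_set_ne (by omega)]
      exact hz t ht1 hlt
    · have : t = j := by omega
      subst this
      rw [List.getElem?_set_self (by omega)]
  by_cases hupd : (rn : Int) < (j : Int) + (pvL rev j : Int)
  · rw [if_pos hupd]
    refine ⟨hset_len, hset_get, j, j + pvL rev j, rfl, by push_cast; ring, Or.inr ?_⟩
    refine ⟨hj1, by omega, by omega, by omega, by omega⟩
  · rw [if_neg hupd]
    refine ⟨hset_len, hset_get, ln, rn, rfl, rfl, ?_⟩
    rcases hbox with ⟨h0, h0'⟩ | ⟨hln1, hlnj, hlnrn, hrnlen, hbox'⟩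
    · exact Or.inl ⟨h0, h0'⟩
    · exact Or.inr ⟨hln1, by omega, hlnrn, hrnlen, hbox'⟩

theorem pvZFold_inv (rev : List Int) (k : Nat) (hk : k + 1 ≤ rev.length) :
    pvInv rev (k + 1) ((PySem.List.pyRange 1 ((k : Int) + 1) 1).foldl (pvZStep rev)
      (List.replicate rev.length 0, 0, 0)) := by
  induction k with
  | zero =>
    have h0 : PySem.List.pyRange 1 ((0 : Nat) + 1 : Int) 1 = [] := by
      apply PySem.List.pyRange_one_eq_nil; norm_num
    rw [h0]
    exact ⟨by simp, by omega, 0, 0, rfl, rfl, Or.inl ⟨rfl, rfl⟩⟩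
  | succ k ih =>
    have hsplit : PySem.List.pyRange 1 (((k + 1 : Nat) : Int) + 1) 1
        = PySem.List.pyRange 1 ((k : Int) + 1) 1 ++ [(k : Int) + 1] := by
      have : (((k + 1 : Nat) : Int) + 1) = ((k : Int) + 1) + 1 := by push_cast; ring
      rw [this]
      exact PySem.List.pyRange_one_succ_right (by omega)
    rw [hsplit, List.foldl_append]
    have hstep := pvZStep_inv rev (k + 1)
      ((PySem.List.pyRange 1 ((k : Int) + 1) 1).foldl (pvZStep rev)
        (List.replicate rev.length 0, 0, 0))
      (ih (by omega)) (by omega) (by omega)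
    have hc : (((k + 1 : Nat) : Int)) = (k : Int) + 1 := by push_cast; ring
    rw [hc] at hstep
    simpa using hstep

-- negative-index read seq[-1 - t] is rev[t]
theorem pvGet_neg (seq : List Int) (t : Nat) (ht : t < seq.length) :
    PySem.List.pyGet? seq (-1 - (t : Int)) = seq.reverse[t]? := by
  have h1 : (-1 - (t : Int)) = -(((t + 1 : Nat) : Int)) := by push_cast; ring
  rw [h1, PySem.List.pyGet?_neg_natCast seq (t + 1) (by omega) (by omega)]
  rw [List.getElem?_eq_getElem (by omega), List.getElem?_eq_getElem (by simpa using ht)]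
  simp [List.getElem_reverse]
  congr 1
  omega

-- forward read seq[i - t] is rev[(n - 1 - i) + t]
theorem pvGet_fwd (seq : List Int) (i t : Nat) (hti : t ≤ i) (hi : i < seq.length) :
    PySem.List.pyGet? seq ((i : Int) - (t : Int)) = seq.reverse[(seq.length - 1 - i) + t]? := by
  have h1 : ((i : Int) - (t : Int)) = ((i - t : Nat) : Int) := by push_cast [hti]; ring
  rw [h1, PySem.List.pyGet?_natCast]
  have h2 : seq.length - 1 - i + t < seq.length := by omega
  rw [List.getElem?_eq_getElem (by omega : i - t < seq.length),
    List.getElem?_eq_getElem (by simpa using h2)]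
  simp [List.getElem_reverse]
  congr 1
  omega

theorem pvAInner_zero (seq : List Int) (max_len : Option Int) (a b c : Int) :
    pvAInner seq max_len 0 a b c = c := rfl

theorem pvAInner_succ (seq : List Int) (max_len : Option Int) (fuel : Nat) (a b c : Int) :
    pvAInner seq max_len (fuel + 1) a b c =
      (if 0 ≤ b ∧ PySem.List.pyGet? seq a = PySem.List.pyGet? seq b then
        match max_len with
        | some m => if c + 1 > m then c + 1
                    else pvAInner seq max_len fuel (a - 1) (b - 1) (c + 1)
        | none => pvAInner seq max_len fuel (a - 1) (b - 1) (c + 1)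
      else c) := rfl

theorem pvAInner_aux (seq : List Int) (max_len : Option Int) (i : Nat) (hi : i + 2 ≤ seq.length)
    (t : Nat) (ht : t ≤ pvT max_len (pvL seq.reverse (seq.length - 1 - i)))
    (hside : ∀ m, max_len = some m → ((t : Int) ≤ m ∨ t = 0)) :
    pvAInner seq max_len (i + 1 - t) (-1 - (t : Int)) ((i : Int) - (t : Int)) (t : Int)
      = (pvT max_len (pvL seq.reverse (seq.length - 1 - i)) : Int) := by
  have hrl : seq.reverse.length = seq.length := by simp
  set n := seq.length with hn
  set j := n - 1 - i with hj
  set L := pvL seq.reverse j with hLdef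
  set T := pvT max_len L with hT
  have hLle : L ≤ i + 1 := by
    have := pvL_le seq.reverse j
    omega
  have hTle : T ≤ L := by
    rcases max_len with _ | m <;> simp [hT, pvT]
  rcases Nat.lt_or_ge t T with hlt | hge
  · -- the loop matches here and continues (or hits the cap right after the increment)
    have hti : t ≤ i := by omega
    have hcond : (0 : Int) ≤ (i : Int) - (t : Int) ∧
        PySem.List.pyGet? seq (-1 - (t : Int)) = PySem.List.pyGet? seq ((i : Int) - (t : Int)) := by
      refine ⟨by omega, ?_⟩
      rw [pvGet_neg seq t (by omega), pvGet_fwd seq i t hti (by omega)]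
      have h1 : seq.reverse[t]? = (seq.reverse.drop j)[t]? :=
        pvTakeEq_get? (pvLcp_take seq.reverse (seq.reverse.drop j)) (by omega : t < L)
      rw [h1, List.getElem?_drop]
    have hfuel : i + 1 - t = (i - t) + 1 := by omega
    rw [hfuel, pvAInner_succ, if_pos hcond]
    have e1 : (-1 - (t : Int) - 1) = -1 - (((t + 1 : Nat) : Int)) := by push_cast; ring
    have e2 : ((i : Int) - (t : Int) - 1) = (i : Int) - (((t + 1 : Nat) : Int)) := by push_cast; ring
    have e3 : ((t : Int) + 1) = (((t + 1 : Nat) : Int)) := by push_cast; ring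
    have e4 : i - t = i + 1 - (t + 1) := by omega
    rcases max_len with _ | m
    · rw [e1, e2, e3, e4]
      exact pvAInner_aux seq none i hi (t + 1)
        (by simp only [← hn, ← hj, ← hLdef, ← hT]; omega) (by simp)
    · simp only
      by_cases hbrk : (t : Int) + 1 > m
      · rw [if_pos hbrk]
        have hcap : (((max 1 (m + 1)).toNat : Int)) = max 1 (m + 1) :=
          Int.toNat_of_nonneg (by omega)
        have hTval : T = min L (max 1 (m + 1)).toNat := by simp [hT, pvT]
        have : (t : Int) + 1 = (T : Int) := by
          have h1 : t + 1 ≤ T := by omega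
          have h2 : T ≤ (max 1 (m + 1)).toNat := by omega
          omega
        rw [this]
      · rw [if_neg hbrk, e1, e2, e3, e4]
        exact pvAInner_aux seq (some m) i hi (t + 1)
          (by simp only [← hn, ← hj, ← hLdef, ← hT]; omega) (by
          intro m' hm'
          obtain rfl : m' = m := (Option.some.inj hm').symm
          left; push_cast; omega)
  · -- t = T : the loop stops here
    have hteq : t = T := by omega
    rcases Nat.lt_or_ge i t with hit | hti
    · -- i_search has run off the left end: fuel is 0 and the loop has stopped
      have : i + 1 - t = 0 := by omega
      rw [this, pvAInner_zero, hteq]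
    · -- mismatch at offset t
      have htL : t = L := by
        rcases max_len with _ | m
        · simpa [hT, pvT] using hteq
        · rcases hside m rfl with hsm | h0
          · have hcap : (((max 1 (m + 1)).toNat : Int)) = max 1 (m + 1) :=
              Int.toNat_of_nonneg (by omega)
            have hTval : T = min L (max 1 (m + 1)).toNat := by simp [hT, pvT]
            omega
          · have hTval : T = min L (max 1 (m + 1)).toNat := by simp [hT, pvT]
            have hcap : 1 ≤ (max 1 (m + 1)).toNat := by
              have : (1 : Int) ≤ max 1 (m + 1) := le_max_left _ _
              omega
            omega
      have hLfold : pvLcp seq.reverse (seq.reverse.drop j) = t := by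
        rw [htL, hLdef]; rfl
      have hcond : ¬ ((0 : Int) ≤ (i : Int) - (t : Int) ∧
          PySem.List.pyGet? seq (-1 - (t : Int)) = PySem.List.pyGet? seq ((i : Int) - (t : Int))) := by
        rintro ⟨-, heq⟩
        rw [pvGet_neg seq t (by omega), pvGet_fwd seq i t hti (by omega)] at heq
        have hne := pvLcp_get?_ne seq.reverse (seq.reverse.drop j)
          (by rw [hLfold, hrl]; omega)
          (by rw [hLfold]; simp only [List.length_drop, hrl]; omega)
        apply hne
        rw [List.getElem?_drop, hLfold]
        exact heq
      have hfuel : i + 1 - t = (i - t) + 1 := by omega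
      rw [hfuel, pvAInner_succ, if_neg hcond, hteq]
termination_by i + 1 - t
decreasing_by all_goals omega

theorem pvAInner_spec (seq : List Int) (max_len : Option Int) (i : Nat) (hi : i + 2 ≤ seq.length) :
    pvAInner seq max_len (i + 1) (-1) (i : Int) 0
      = (pvT max_len (pvL seq.reverse (seq.length - 1 - i)) : Int) := by
  have h := pvAInner_aux seq max_len i hi 0 (by omega)
    (by intro m hm; right; rfl)
  simpa using h

-- the list A's outer loop produces for start index i, newest start first
def pvListA (seq : List Int) (max_len : Option Int) : Nat → List (Int × Int)
  | 0 => []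
  | i+1 =>
    (if 0 < pvT max_len (pvL seq.reverse (seq.length - 1 - (i+1)))
     then [((i : Int) + 2, (pvT max_len (pvL seq.reverse (seq.length - 1 - (i+1))) : Int))]
     else []) ++ pvListA seq max_len i

theorem pvAOuter_eq (seq : List Int) (max_len : Option Int) (i : Nat) (hi : i + 2 ≤ seq.length)
    (acc : List (Int × Int)) :
    pvAOuter seq max_len (i : Int) acc = acc ++ pvListA seq max_len i := by
  induction i generalizing acc with
  | zero =>
    rw [pvAOuter]
    simp [pvListA]
  | succ i ih =>
    rw [pvAOuter, dif_pos (by exact_mod_cast Nat.succ_pos i)]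
    have htn : (((i + 1 : Nat) : Int)).toNat = i + 1 := Int.toNat_natCast _
    have hlen : pvAInner seq max_len ((((i + 1 : Nat) : Int)).toNat + 1) (-1) ((i + 1 : Nat) : Int) 0
        = (pvT max_len (pvL seq.reverse (seq.length - 1 - (i + 1))) : Int) := by
      rw [htn]
      exact pvAInner_spec seq max_len (i + 1) (by omega)
    simp only [hlen]
    have hsub : (((i + 1 : Nat) : Int)) - 1 = (i : Int) := by push_cast; ring
    rw [hsub, ih (by omega)]
    by_cases hpos : 0 < pvT max_len (pvL seq.reverse (seq.length - 1 - (i + 1)))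
    · rw [if_pos (by exact_mod_cast hpos), pvListA, if_pos hpos]
      have hidx : (((i + 1 : Nat) : Int)) + 1 = (i : Int) + 2 := by push_cast; ring
      rw [hidx]
      simp [List.append_assoc]
    · rw [if_neg (by simpa using (by omega : ¬ (0:Int) < (pvT max_len (pvL seq.reverse (seq.length - 1 - (i + 1))) : Int)) ), pvListA, if_neg hpos]
      simp

-- the capped value B writes equals the capped value A records
theorem pvSnd (max_len : Option Int) (v : Int) (L : Nat) (hv : v = (L : Int)) :
    (match max_len with
     | none => v
     | some m => min v (max 1 (m + 1))) = ((pvT max_len L : Int)) := by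
  rcases max_len with _ | m
  · simpa [pvT] using hv
  · simp only [hv, pvT]
    have hcap : (((max 1 (m + 1)).toNat : Int)) = max 1 (m + 1) :=
      Int.toNat_of_nonneg (by omega)
    push_cast
    omega

-- B's comprehension over the final z table produces exactly A's pre-sort list
theorem pvBridge (seq : List Int) (max_len : Option Int) (z : List Int)
    (hz : ∀ t : Nat, 1 ≤ t → t < seq.length → z[t]? = some ((pvL seq.reverse t : Int))) :
    ∀ (c j0 : Nat), 1 ≤ j0 → j0 + c = seq.length - 1 → 2 ≤ seq.length →
    ((PySem.List.pyRange (j0 : Int) ((seq.length : Int) - 1) 1).filter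
        (fun j => 0 < PySem.List.pyGetD z j 0)).map
        (fun j => ((seq.length : Int) - j, match max_len with
                   | none => PySem.List.pyGetD z j 0
                   | some m => min (PySem.List.pyGetD z j 0) (max 1 (m + 1))))
      = pvListA seq max_len c := by
  intro c
  induction c with
  | zero =>
    intro j0 hj1 hjc hn2
    have hnil : PySem.List.pyRange (j0 : Int) ((seq.length : Int) - 1) 1 = [] :=
      PySem.List.pyRange_one_eq_nil (by omega)
    rw [hnil]
    simp [pvListA]
  | succ c ih =>
    intro j0 hj1 hjc hn2
    have hcons : PySem.List.pyRange (j0 : Int) ((seq.length : Int) - 1) 1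
        = (j0 : Int) :: PySem.List.pyRange ((j0 : Int) + 1) ((seq.length : Int) - 1) 1 :=
      PySem.List.pyRange_one_cons (by omega)
    have hval : PySem.List.pyGetD z (j0 : Int) 0 = ((pvL seq.reverse j0 : Int)) := by
      rw [PySem.List.pyGetD_natCast, List.getD_eq_getElem?_getD, hz j0 hj1 (by omega)]
      rfl
    have hjeq : seq.length - 1 - (c + 1) = j0 := by omega
    have htl : PySem.List.pyRange ((j0 : Int) + 1) ((seq.length : Int) - 1) 1
        = PySem.List.pyRange (((j0 + 1 : Nat) : Int)) ((seq.length : Int) - 1) 1 := by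
      norm_num
    rw [hcons, List.filter_cons, htl]
    by_cases hL : 0 < pvL seq.reverse j0
    · have hT : 0 < pvT max_len (pvL seq.reverse j0) := by
        rcases max_len with _ | m
        · simpa [pvT] using hL
        · have : (1 : Int) ≤ max 1 (m + 1) := le_max_left _ _
          simp only [pvT]
          omega
      rw [if_pos (by rw [hval]; exact decide_eq_true (by exact_mod_cast hL))]
      rw [List.map_cons, ih (j0 + 1) (by omega) (by omega) hn2]
      rw [pvListA, hjeq, if_pos hT]
      have hfst : ((seq.length : Int)) - (j0 : Int) = (c : Int) + 2 := by omega
      rw [hfst, pvSnd max_len _ _ hval]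
      rfl
    · have hL0 : pvL seq.reverse j0 = 0 := by omega
      have hT : ¬ 0 < pvT max_len (pvL seq.reverse j0) := by
        rcases max_len with _ | m <;> simp [pvT, hL0]
      rw [if_neg (by rw [hval, hL0]; simp)]
      rw [ih (j0 + 1) (by omega) (by omega) hn2]
      rw [pvListA, hjeq, if_neg hT]
      simp

-- ===== VERDICT (by name: the statement is the Claim_ definition above) =====
theorem find_all_longest_py_spec : Claim_equal_find_all_longest_py := by
  intro seq max_len _
  unfold Spec_find_all_longest_py
  simp only [find_all_longest_py, find_all_longest_py_alt]
  refine congrArg (fun l => PySem.List.sorted l (fun p : Int × Int => p.2) true) ?_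
  rcases Nat.lt_or_ge seq.length 3 |>.symm with hn3 | hn2
  · -- n ≥ 3 : both sides are the filtered match list
    have hcast : ((seq.length : Int)) - 2 = (((seq.length - 2 : Nat) : Int)) := by omega
    rw [hcast, pvAOuter_eq seq max_len (seq.length - 2) (by omega) []]
    have hinv := pvZFold_inv seq.reverse (seq.length - 1) (by simp; omega)
    have hcast2 : (((seq.length - 1 : Nat) : Int)) + 1 = ((seq.length : Int)) := by omega
    rw [hcast2] at hinv
    simp only [List.length_reverse] at hinv
    have hfix : seq.length - 1 + 1 = seq.length := by omega
    rw [hfix] at hinv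
    obtain ⟨-, hzz, -⟩ := hinv
    have hbr := pvBridge seq max_len
      ((PySem.List.pyRange 1 ((seq.length : Int)) 1).foldl (pvZStep seq.reverse)
        (List.replicate seq.length 0, 0, 0)).1
      hzz (seq.length - 2) 1 (by omega) (by omega) (by omega)
    rw [← hbr]
    norm_num
  · -- n ≤ 2 : both sides are empty
    rw [pvAOuter, dif_neg (by omega)]
    have hnil : PySem.List.pyRange 1 ((seq.length : Int) - 1) 1 = [] :=
      PySem.List.pyRange_one_eq_nil (by omega)
    rw [hnil]
    simp
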